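-- pv_equiv track=rewrite | github.com/Klaudia1303/student_code_analysis | Progetto-tirocinio2024/data/student_data/2065747_Perillo/LabPython08/A_Ex1.py | A_Ex1
-- ===== SOURCE A (Python) =====
-- def A_Ex1(l):
--     a=0
--     risultato=""
--     lunghezza=0
--     conta=0
--     for i in l:
--         for k in i:
--             while lunghezza<len(l):
--                 if k in l[lunghezza]:
--                     conta+=1
--                 lunghezza+=1
--             if k.isupper()or k.isdecimal():
--                 conta=-1
--             if conta>a:
--                 a=conta
--                 risultato=k
--             if conta==a and ord(k)>ord(risultato):
--                 a=conta
--                 risultato=k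
--             conta=0
--             lunghezza=0
--     return(risultato)
-- ===== SOURCE B (Python) =====
-- def A_Ex1(l):
--     counts = {}
--     for s in l:
--         for c in set(s):
--             counts[c] = counts.get(c, 0) + 1
--     candidates = [c for s in l for c in s if not (c.isupper() or c.isdecimal())]
--     if not candidates:
--         return ""
--     return max(candidates, key=lambda c: (counts.get(c, 0), ord(c)))
-- ===== Notes on version B (the rewrite author's own statement) =====
-- stated objective: faster
-- what changed: A's per-character-occurrence rescan of the whole list with running-max and manual tie branches is replaced by a dict of per-character containment counts built once plus a single keyed max(candidates, key=(count, ord)) selection.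
import Mathlib
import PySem

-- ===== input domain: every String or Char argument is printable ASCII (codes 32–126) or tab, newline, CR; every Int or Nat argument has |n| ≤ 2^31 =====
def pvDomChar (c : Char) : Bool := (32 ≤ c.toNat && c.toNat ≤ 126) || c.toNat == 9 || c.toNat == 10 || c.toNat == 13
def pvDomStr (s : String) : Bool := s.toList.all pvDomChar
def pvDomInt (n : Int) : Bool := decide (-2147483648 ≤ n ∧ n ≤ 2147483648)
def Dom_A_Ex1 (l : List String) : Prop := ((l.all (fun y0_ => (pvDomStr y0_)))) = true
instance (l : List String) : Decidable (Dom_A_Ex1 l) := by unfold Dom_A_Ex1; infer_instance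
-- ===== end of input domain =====

-- B replaces A's per-occurrence rescan of all strings (with running-max/tie branches) by a count
-- table built once plus a single keyed max — measurably faster; exact same return value on every
-- input (A never raises: ord("") is unreachable).

-- ===== PORT A =====

-- ord(risultato): total stand-in; Python's ord("") would raise TypeError, but that call is
-- unreachable in A (risultato is "" only while a = 0 and the tie branch needs conta = a with conta ≥ 1).
def pyOrdStr (s : String) : Int := ((s.toList.headD (Char.ofNat 0)).toNat : Int)

-- 'while lunghezza < len(l): if k in l[lunghezza]: conta += 1; lunghezza += 1' — structural
-- recursion over the not-yet-scanned suffix l[lunghezza:], same accumulator conta.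
def A_Ex1_while (k : Char) : List String → Int → Int
  | [], conta => conta
  | s :: rest, conta =>
      A_Ex1_while k rest (if PySem.Str.isIn (String.ofList [k]) s then conta + 1 else conta)

-- the body of the inner 'for k in i' loop, state (a, risultato)
def A_Ex1_step (l : List String) (st : Int × String) (k : Char) : Int × String :=
  let conta0 := A_Ex1_while k l 0
  let conta := if PySem.Chars.isupper k || PySem.Chars.isdigit k then -1 else conta0
  let st1 := if conta > st.1 then (conta, String.ofList [k]) else st
  if conta = st1.1 ∧ ((k.toNat : Int)) > pyOrdStr st1.2 then (conta, String.ofList [k]) else st1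

def A_Ex1 (l : List String) : String :=
  (l.foldl (fun st i => i.toList.foldl (A_Ex1_step l) st) ((0 : Int), "")).2

-- ===== PORT B =====

-- counts[c] = number of strings containing c, built once from each string's distinct chars
def A_Ex1_counts (l : List String) : PySem.Dict Char Int :=
  l.foldl (fun d s =>
    (PySem.Set.ofList s.toList).foldl (fun d c => d.insert c (d.getD c 0 + 1)) d)
    PySem.Dict.empty

-- [c for s in l for c in s if not (c.isupper() or c.isdecimal())]
def A_Ex1_cands (l : List String) : List Char :=
  l.foldl (fun acc s =>
    acc ++ s.toList.filter (fun c => !(PySem.Chars.isupper c || PySem.Chars.isdigit c))) []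

def A_Ex1_alt (l : List String) : String :=
  let counts := A_Ex1_counts l
  match PySem.List.max2? (A_Ex1_cands l) (fun c => counts.getD c 0) (fun c => ((c.toNat : Int))) with
  | none => ""
  | some c => String.ofList [c]

-- ===== PRECONDITION & SPEC =====
def Spec_A_Ex1 (l : List String) (out : String) : Prop := out = A_Ex1_alt l
instance (l : List String) (out : String) : Decidable (Spec_A_Ex1 l out) := by unfold Spec_A_Ex1; infer_instance

-- ===== CLAIM (what is proved, stated in full; the proofs are below) =====
def Claim_equal_A_Ex1 : Prop := ∀ (l : List String), Dom_A_Ex1 l → Spec_A_Ex1 l (A_Ex1 l)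

-- ===== LEMMAS AND PROOFS =====

-- the number of strings of l containing c, as an Int
def pvCnt (l : List String) (c : Char) : Int :=
  (l.countP (fun s => PySem.Chars.isIn [c] s.toList) : Nat)

def pvSkip (c : Char) : Bool := PySem.Chars.isupper c || PySem.Chars.isdigit c

lemma isIn_singleton (c : Char) (cs : List Char) :
    PySem.Chars.isIn [c] cs = cs.contains c := by
  rcases h : PySem.Chars.isIn [c] cs with _ | _
  · have := (PySem.Chars.isIn_eq_false_iff [c] cs).mp h
    rw [List.singleton_infix_iff] at this
    simpa using this
  · have := (PySem.Chars.isIn_iff_infix [c] cs).mp h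
    rw [List.singleton_infix_iff] at this
    simpa using this

lemma while_eq (k : Char) (rest : List String) (conta : Int) :
    A_Ex1_while k rest conta = conta + (rest.countP (fun s => PySem.Chars.isIn [k] s.toList) : Nat) := by
  induction rest generalizing conta with
  | nil => simp [A_Ex1_while]
  | cons s rs ih =>
      rw [A_Ex1_while, ih]
      by_cases h : PySem.Chars.isIn [k] s.toList = true
      · simp [PySem.Str.isIn, h]
        ring
      · simp only [Bool.not_eq_true] at h
        simp [PySem.Str.isIn, h]

lemma cnt_pos_of_mem (l : List String) (s : String) (c : Char)
    (hs : s ∈ l) (hc : c ∈ s.toList) : 0 < pvCnt l c := by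
  have : 0 < l.countP (fun s => PySem.Chars.isIn [c] s.toList) := by
    rw [List.countP_pos_iff]
    exact ⟨s, hs, by rw [isIn_singleton]; simpa using hc⟩
  unfold pvCnt
  exact_mod_cast this

-- the inner counting fold of A_Ex1_counts over a list of chars adds cs.count c to key c
lemma counts_inner (cs : List Char) (d : PySem.Dict Char Int) (c : Char) :
    ((cs.foldl (fun d c' => d.insert c' (d.getD c' 0 + 1)) d).getD c 0)
      = d.getD c 0 + (cs.count c : Nat) := by
  induction cs generalizing d with
  | nil => simp
  | cons x xs ih =>
      rw [List.foldl_cons, ih, PySem.Dict.getD_insert]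
      by_cases h : c = x
      · subst h; simp; ring
      · simp [h, Ne.symm h]

lemma counts_getD (l : List String) (c : Char) :
    (A_Ex1_counts l).getD c 0 = pvCnt l c := by
  suffices h : ∀ d : PySem.Dict Char Int,
      (l.foldl (fun d s => (PySem.Set.ofList s.toList).foldl
          (fun d c => d.insert c (d.getD c 0 + 1)) d) d).getD c 0
        = d.getD c 0 + pvCnt l c by
    simpa using h PySem.Dict.empty
  induction l with
  | nil => simp [pvCnt]
  | cons s rest ih =>
      intro d
      rw [List.foldl_cons, ih, counts_inner]
      have hcount : ((PySem.Set.ofList s.toList).count c : Int)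
          = if PySem.Chars.isIn [c] s.toList then 1 else 0 := by
        by_cases hm : c ∈ s.toList
        · rw [List.count_eq_one_of_mem (PySem.Set.nodup_ofList _)
            ((PySem.Set.mem_ofList _ _).mpr hm)]
          rw [isIn_singleton]; simp [hm]
        · rw [List.count_eq_zero_of_not_mem (fun hx => hm ((PySem.Set.mem_ofList _ _).mp hx))]
          rw [isIn_singleton]; simp [hm]
      rw [hcount]
      simp only [pvCnt, List.countP_cons]
      by_cases h : PySem.Chars.isIn [c] s.toList = true
      · simp [h]; ring
      · simp only [Bool.not_eq_true] at h
        simp [h]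

-- one step of Python's max(..., key=lambda c: (counts[c], ord(c))) as max2? folds it
def pvMaxStep (l : List String) (acc : Option Char) (x : Char) : Option Char :=
  match acc with
  | none => some x
  | some m =>
      if (decide (pvCnt l m < pvCnt l x)
          || !decide (pvCnt l x < pvCnt l m) && decide ((m.toNat : Int) < (x.toNat : Int))) = true
      then some x else some m

lemma maxstep_mem (l : List String) (ks : List Char) (a : Option Char) (m : Char)
    (h : ks.foldl (pvMaxStep l) a = some m) :
    (a = some m) ∨ m ∈ ks := by
  induction ks generalizing a with
  | nil => exact Or.inl h
  | cons x xs ih =>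
      rw [List.foldl_cons] at h
      rcases ih _ h with h' | h'
      · rcases a with _ | m'
        · right; simp [pvMaxStep] at h'; simp [h']
        · rw [show pvMaxStep l (some m') x
              = if (decide (pvCnt l m' < pvCnt l x)
                    || !decide (pvCnt l x < pvCnt l m')
                       && decide ((m'.toNat : Int) < (x.toNat : Int))) = true
                then some x else some m' from rfl] at h'
          split at h'
          · right; simp at h'; simp [h']
          · left; exact h'
      · right; simp [h']

lemma ordStr_single (c : Char) : pyOrdStr (String.ofList [c]) = (c.toNat : Int) := by
  simp [pyOrdStr]

-- the heart: A's running-max/tie fold over a char sequence equals B's keyed max over the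
-- non-skipped chars of that sequence, provided every non-skipped char occurs in some string of l
lemma fold_char (l : List String) (ks : List Char)
    (H : ∀ k ∈ ks, pvSkip k = false → 0 < pvCnt l k) :
    ks.foldl (A_Ex1_step l) ((0 : Int), "")
      = match (ks.filter (fun c => !pvSkip c)).foldl (pvMaxStep l) none with
        | none => ((0 : Int), "")
        | some m => (pvCnt l m, String.ofList [m]) := by
  induction ks using List.reverseRecOn with
  | nil => rfl
  | append_singleton ks k ih =>
      have Hks : ∀ k' ∈ ks, pvSkip k' = false → 0 < pvCnt l k' := by
        intro k' hk' hsk'; exact H k' (by simp [hk']) hsk'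
      have hkmem : k ∈ ks ++ [k] := by simp
      rw [List.foldl_append, List.filter_append, ih Hks]
      by_cases hs : pvSkip k = true
      · -- skipped char: conta = -1, state unchanged on both sides
        have hf : List.filter (fun c => !pvSkip c) [k] = [] := by simp [hs]
        rw [hf, List.append_nil]
        rcases hM : (ks.filter (fun c => !pvSkip c)).foldl (pvMaxStep l) none with _ | m
        · simp only [List.foldl_cons, List.foldl_nil]
          unfold A_Ex1_step
          rw [pvSkip] at hs
          simp only [hs, if_true]
          norm_num
        · have hmem : m ∈ ks.filter (fun c => !pvSkip c) := by
            rcases maxstep_mem l _ _ _ hM with h' | h'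
            · exact absurd h' (by simp)
            · exact h'
          have hmk : m ∈ ks := (List.mem_filter.mp hmem).1
          have hms : pvSkip m = false := by
            have := (List.mem_filter.mp hmem).2; simpa using this
          have hpos : 0 < pvCnt l m := Hks m hmk hms
          simp only [List.foldl_cons, List.foldl_nil]
          unfold A_Ex1_step
          rw [pvSkip] at hs
          simp only [hs, if_true]
          have h1 : ¬ ((-1 : Int) > (pvCnt l m, String.ofList [m]).1) := by simp; omega
          rw [if_neg h1]
          have h2 : ¬ ((-1 : Int) = (pvCnt l m, String.ofList [m]).1 ∧
              ((k.toNat : Int)) > pyOrdStr (pvCnt l m, String.ofList [m]).2) := by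
            rintro ⟨h, -⟩; simp at h; omega
          rw [if_neg h2]
      · -- candidate char: conta = pvCnt l k, compare against the running best
        simp only [Bool.not_eq_true] at hs
        have hkpos : 0 < pvCnt l k := H k hkmem hs
        have hconta : A_Ex1_while k l 0 = pvCnt l k := by
          rw [while_eq]; simp [pvCnt]
        have hf : List.filter (fun c => !pvSkip c) [k] = [k] := by simp [hs]
        rw [hf, List.foldl_append]
        rcases hM : (ks.filter (fun c => !pvSkip c)).foldl (pvMaxStep l) none with _ | m
        · -- first candidate: it wins
          simp only [List.foldl_cons, List.foldl_nil]
          unfold A_Ex1_step pvMaxStep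
          rw [pvSkip] at hs
          simp only [hs, if_false, hconta, Bool.false_eq_true]
          have h1 : (pvCnt l k > ((0 : Int), ("" : String)).1) := by simp; omega
          rw [if_pos h1]
          have h2 : ¬ (pvCnt l k = (pvCnt l k, String.ofList [k]).1 ∧
              ((k.toNat : Int)) > pyOrdStr (pvCnt l k, String.ofList [k]).2) := by
            rintro ⟨-, h⟩; rw [ordStr_single] at h; omega
          rw [if_neg h2]
        · have hmem : m ∈ ks.filter (fun c => !pvSkip c) := by
            rcases maxstep_mem l _ _ _ hM with h' | h'
            · exact absurd h' (by simp)
            · exact h'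
          have hmk : m ∈ ks := (List.mem_filter.mp hmem).1
          have hms : pvSkip m = false := by
            have := (List.mem_filter.mp hmem).2; simpa using this
          have hmpos : 0 < pvCnt l m := Hks m hmk hms
          have hOm : pyOrdStr (pvCnt l m, String.ofList [m]).2 = (m.toNat : Int) :=
            ordStr_single m
          have hOk : pyOrdStr (pvCnt l k, String.ofList [k]).2 = (k.toNat : Int) :=
            ordStr_single k
          simp only [List.foldl_cons, List.foldl_nil]
          unfold A_Ex1_step pvMaxStep
          rw [pvSkip] at hs
          simp only [hs, if_false, hconta, Bool.false_eq_true]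
          by_cases h1 : pvCnt l m < pvCnt l k
          · -- strictly larger count: k replaces m on both sides
            rw [if_pos (by simp; omega : pvCnt l k > (pvCnt l m, String.ofList [m]).1)]
            rw [if_neg (by rintro ⟨-, h⟩; rw [hOk] at h; omega :
              ¬ (pvCnt l k = (pvCnt l k, String.ofList [k]).1 ∧
                 ((k.toNat : Int)) > pyOrdStr (pvCnt l k, String.ofList [k]).2))]
            rw [if_pos (by simp; omega :
              (decide (pvCnt l m < pvCnt l k) ||
                !decide (pvCnt l k < pvCnt l m)
                  && decide ((m.toNat : Int) < (k.toNat : Int))) = true)]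
          · rw [if_neg (by simp; omega : ¬ pvCnt l k > (pvCnt l m, String.ofList [m]).1)]
            by_cases h2 : pvCnt l k = pvCnt l m
            · by_cases h3 : (m.toNat : Int) < (k.toNat : Int)
              · -- tie on count, larger ord: k replaces m on both sides
                rw [if_pos (⟨by simpa using h2, by rw [hOm]; omega⟩ :
                  pvCnt l k = (pvCnt l m, String.ofList [m]).1 ∧
                    ((k.toNat : Int)) > pyOrdStr (pvCnt l m, String.ofList [m]).2)]
                rw [if_pos (by simp; omega :
                  (decide (pvCnt l m < pvCnt l k) ||
                    !decide (pvCnt l k < pvCnt l m)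
                      && decide ((m.toNat : Int) < (k.toNat : Int))) = true)]
              · -- tie on count, smaller-or-equal ord: m stays
                rw [if_neg (by rintro ⟨-, h⟩; rw [hOm] at h; omega :
                  ¬ (pvCnt l k = (pvCnt l m, String.ofList [m]).1 ∧
                     ((k.toNat : Int)) > pyOrdStr (pvCnt l m, String.ofList [m]).2))]
                rw [if_neg (by simp; omega :
                  ¬ ((decide (pvCnt l m < pvCnt l k) ||
                      !decide (pvCnt l k < pvCnt l m)
                        && decide ((m.toNat : Int) < (k.toNat : Int))) = true))]
            · -- strictly smaller count: m stays
              rw [if_neg (by rintro ⟨h, -⟩; simp at h; omega :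
                ¬ (pvCnt l k = (pvCnt l m, String.ofList [m]).1 ∧
                   ((k.toNat : Int)) > pyOrdStr (pvCnt l m, String.ofList [m]).2))]
              rw [if_neg (by simp; omega :
                ¬ ((decide (pvCnt l m < pvCnt l k) ||
                    !decide (pvCnt l k < pvCnt l m)
                      && decide ((m.toNat : Int) < (k.toNat : Int))) = true))]

lemma cands_eq (l : List String) :
    A_Ex1_cands l = (l.flatMap (·.toList)).filter (fun c => !pvSkip c) := by
  unfold A_Ex1_cands
  rw [PySem.List.foldl_append_eq_flatMap (g := fun s : String =>
    s.toList.filter (fun c => !(PySem.Chars.isupper c || PySem.Chars.isdigit c)))]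
  simp [List.filter_flatMap, pvSkip]

lemma max2?_eq_maxstep (l : List String) (cs : List Char) :
    PySem.List.max2? cs (fun c => (A_Ex1_counts l).getD c 0) (fun c => ((c.toNat : Int)))
      = cs.foldl (pvMaxStep l) none := by
  unfold PySem.List.max2?
  apply PySem.List.foldl_congr_mem
  intro acc x _
  unfold pvMaxStep
  rcases acc with _ | m
  · rfl
  · simp only [counts_getD]

-- ===== VERDICT (by name: the statement is the Claim_ definition above) =====
theorem A_Ex1_spec : Claim_equal_A_Ex1 := by
  intro l _
  unfold Spec_A_Ex1 A_Ex1
  rw [← List.foldl_flatMap (f := fun s : String => s.toList) (g := A_Ex1_step l)]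
  have H : ∀ k ∈ l.flatMap (·.toList), pvSkip k = false → 0 < pvCnt l k := by
    intro k hk _
    rcases List.mem_flatMap.mp hk with ⟨s, hs, hks⟩
    exact cnt_pos_of_mem l s k hs hks
  rw [fold_char l _ H]
  show _ = A_Ex1_alt l
  unfold A_Ex1_alt
  simp only [cands_eq, max2?_eq_maxstep]
  rcases h : ((l.flatMap (·.toList)).filter (fun c => !pvSkip c)).foldl (pvMaxStep l) none with _ | m <;>
    simp [h]
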